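-- pv_equiv track=rewrite | github.com/august-hw2/25_Programmers_Python | 프로그래머스/0/181893. 배열 조각하기/배열 조각하기.py | solution
-- ===== SOURCE A (Python) =====
-- def solution(arr, query):
--     answer = arr
--
--     for idx, num in enumerate(query):
--         if idx%2: #홀수
--             del answer [:num]
--         else: #짝수
--             del answer [num+1:]
--
--     return answer
-- ===== SOURCE B (Python) =====
-- def solution(arr, query):
--     lo, hi = 0, len(arr)
--     for idx, num in enumerate(query):
--         L = hi - lo
--         if idx % 2:
--             s = L + num if num < 0 else num
--             if s < 0:
--                 s = 0
--             if s > L: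
--                 s = L
--             lo += s
--         else:
--             e = num + 1
--             if e < 0:
--                 e = L + e
--             if e < 0:
--                 e = 0
--             if e > L:
--                 e = L
--             hi = lo + e
--     return arr[lo:hi]
-- ===== Notes on version B (the rewrite author's own statement) =====
-- stated objective: alternative
-- what changed: Instead of physically deleting a slice of the list for every query, B keeps only a (lo, hi) window-bound pair, updates it in O(1) per query with Python's slice-clamping rules, and takes a single slice of arr at the end.
import Mathlib
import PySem

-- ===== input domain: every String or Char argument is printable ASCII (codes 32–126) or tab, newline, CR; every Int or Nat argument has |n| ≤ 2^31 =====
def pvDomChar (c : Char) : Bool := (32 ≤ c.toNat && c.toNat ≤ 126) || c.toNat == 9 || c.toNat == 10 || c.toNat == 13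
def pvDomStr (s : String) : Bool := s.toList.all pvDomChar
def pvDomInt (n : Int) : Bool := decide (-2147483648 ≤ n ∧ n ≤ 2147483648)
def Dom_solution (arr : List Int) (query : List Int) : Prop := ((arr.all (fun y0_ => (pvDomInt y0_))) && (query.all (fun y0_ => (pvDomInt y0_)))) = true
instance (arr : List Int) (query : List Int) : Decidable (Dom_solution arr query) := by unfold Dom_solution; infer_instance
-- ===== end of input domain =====

-- B replaces A's repeated slice-deletions by an O(1)-state pass accumulating window
-- bounds plus a single final slice (alternative algorithm). A mutates `arr` in place
-- (del on the aliased list); the equivalence proved here is about the return value only.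
-- ===== PORT A =====
def solution (arr : List Int) (query : List Int) : List Int :=
  (PySem.List.enumerate query 0).foldl
    (fun answer p =>
      if p.1 % 2 ≠ 0 then
        PySem.List.slice answer (some p.2) none        -- del answer[:num]
      else
        PySem.List.slice answer none (some (p.2 + 1))) -- del answer[num+1:]
    arr

-- ===== PORT B =====
def solution_alt (arr : List Int) (query : List Int) : List Int :=
  let st := (PySem.List.enumerate query 0).foldl
    (fun (st : Int × Int) p =>
      let lo := st.1
      let hi := st.2
      let L := hi - lo
      let num := p.2
      if p.1 % 2 ≠ 0 then
        let s := if num < 0 then L + num else num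
        let s := if s < 0 then 0 else s
        let s := if s > L then L else s
        (lo + s, hi)
      else
        let e := num + 1
        let e := if e < 0 then L + e else e
        let e := if e < 0 then 0 else e
        let e := if e > L then L else e
        (lo, lo + e))
    (0, (arr.length : Int))
  PySem.List.slice arr (some st.1) (some st.2)

-- ===== PRECONDITION & SPEC =====
def Spec_solution (arr : List Int) (query : List Int) (out : List Int) : Prop := out = solution_alt arr query
instance (arr : List Int) (query : List Int) (out : List Int) : Decidable (Spec_solution arr query out) := by unfold Spec_solution; infer_instance

-- ===== CLAIM (what is proved, stated in full; the proofs are below) =====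
def Claim_equal_solution : Prop := ∀ (arr : List Int) (query : List Int), Dom_solution arr query → Spec_solution arr query (solution arr query)

-- ===== LEMMAS AND PROOFS =====

-- Proof-side names for the two loop bodies (definitionally equal to the inline lambdas of the ports).
def pvStepA (answer : List Int) (p : Int × Int) : List Int :=
  if p.1 % 2 ≠ 0 then
    PySem.List.slice answer (some p.2) none
  else
    PySem.List.slice answer none (some (p.2 + 1))

def pvStepB (st : Int × Int) (p : Int × Int) : Int × Int :=
  let lo := st.1
  let hi := st.2
  let L := hi - lo
  let num := p.2
  if p.1 % 2 ≠ 0 then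
    let s := if num < 0 then L + num else num
    let s := if s < 0 then 0 else s
    let s := if s > L then L else s
    (lo + s, hi)
  else
    let e := num + 1
    let e := if e < 0 then L + e else e
    let e := if e < 0 then 0 else e
    let e := if e > L then L else e
    (lo, lo + e)

-- B's nested clamping of the left cut equals Python's slice-index clamp.
theorem sclamp_eq (m : Nat) (num : Int) :
    (let s := if num < 0 then (m : Int) + num else num
     let s := if s < 0 then 0 else s
     if s > (m : Int) then (m : Int) else s) = (PySem.List.clampIdx m num : Int) := by
  unfold PySem.List.clampIdx
  simp only
  split_ifs <;> omega

-- B's nested clamping of the right cut equals Python's slice-index clamp.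
theorem eclamp_eq (m : Nat) (num : Int) :
    (let e := num + 1
     let e := if e < 0 then (m : Int) + e else e
     let e := if e < 0 then 0 else e
     if e > (m : Int) then (m : Int) else e) = (PySem.List.clampIdx m (num + 1) : Int) := by
  unfold PySem.List.clampIdx
  simp only
  split_ifs <;> omega

theorem slice_none_some (xs : List Int) (b : Int) :
    PySem.List.slice xs none (some b) = xs.take (PySem.List.clampIdx xs.length b) := by
  simp [PySem.List.slice]

-- Loop invariant: A's list after any prefix of the queries is the window
-- arr[l : l+m] tracked by B's bound pair.
theorem solution_loop (ps : List (Int × Int)) (arr : List Int) (l m : Nat)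
    (h : l + m ≤ arr.length) :
    ps.foldl pvStepA ((arr.drop l).take m)
    = (let st := ps.foldl pvStepB ((l : Int), (l : Int) + (m : Int))
       PySem.List.slice arr (some st.1) (some st.2)) := by
  induction ps generalizing l m with
  | nil =>
      simp only [List.foldl_nil]
      rw [PySem.List.slice_natCast_add]
  | cons p ps ih =>
      simp only [List.foldl_cons]
      have hlen : ((arr.drop l).take m).length = m := by
        simp; omega
      have hL : ((l : Int) + (m : Int)) - (l : Int) = (m : Int) := by ring
      by_cases hp : p.1 % 2 ≠ 0
      · -- odd index: cut from the left
        set k := PySem.List.clampIdx m p.2 with hkdef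
        have hk : k ≤ m := PySem.List.clampIdx_le _ _
        have hA : pvStepA ((arr.drop l).take m) p = (arr.drop (l + k)).take (m - k) := by
          unfold pvStepA
          rw [if_pos hp, PySem.List.slice_some_none, hlen, ← hkdef,
            List.drop_take, List.drop_drop]
        have hB : pvStepB ((l : Int), (l : Int) + (m : Int)) p
            = (((l + k : Nat) : Int), ((l + k : Nat) : Int) + ((m - k : Nat) : Int)) := by
          unfold pvStepB
          simp only [if_pos hp, hL]
          have hc := sclamp_eq m p.2
          simp only at hc
          rw [hc, ← hkdef]
          simp only [Prod.mk.injEq]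
          omega
        rw [hA, hB, ih (l + k) (m - k) (by omega)]
      · -- even index: cut from the right
        set k := PySem.List.clampIdx m (p.2 + 1) with hkdef
        have hk : k ≤ m := PySem.List.clampIdx_le _ _
        have hA : pvStepA ((arr.drop l).take m) p = (arr.drop l).take k := by
          unfold pvStepA
          rw [if_neg hp, slice_none_some, hlen, ← hkdef,
            List.take_take, Nat.min_eq_left hk]
        have hB : pvStepB ((l : Int), (l : Int) + (m : Int)) p
            = (((l : Nat) : Int), ((l : Nat) : Int) + ((k : Nat) : Int)) := by
          unfold pvStepB
          simp only [if_neg hp, hL]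
          have hc := eclamp_eq m p.2
          simp only at hc
          rw [hc, ← hkdef]
        rw [hA, hB, ih l k (by omega)]

-- ===== VERDICT (by name: the statement is the Claim_ definition above) =====
theorem solution_spec : Claim_equal_solution := by
  intro arr query _
  unfold Spec_solution solution solution_alt
  show (PySem.List.enumerate query 0).foldl pvStepA arr
      = (let st := (PySem.List.enumerate query 0).foldl pvStepB (0, (arr.length : Int))
         PySem.List.slice arr (some st.1) (some st.2))
  have := solution_loop (PySem.List.enumerate query 0) arr 0 arr.length (by omega)
  simpa using this
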